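-- pv_equiv track=rewrite | github.com/yoyoong/EpiReadTk | common/EpibedFile.py | separate_rle_string
-- ===== SOURCE A (Python) =====
-- import itertools
--
-- def separate_rle_string(rle_string: str):
--     rle_list = []
--     for key, group in itertools.groupby(rle_string, str.isdigit):
--         value = "".join(group)
--         if value.isdigit():
--             rle_list.append(value)
--         else:
--             for char in value:
--                 rle_list.append(char)
--     return rle_list
-- ===== SOURCE B (Python) =====
-- def separate_rle_string(rle_string: str):
--     # Single-pass tokenizer with a digit-run buffer instead of itertools.groupby.
--     result = []
--     buf = ""
--     for ch in rle_string:
--         if ch.isdigit():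
--             buf += ch
--         else:
--             if buf:
--                 result.append(buf)
--                 buf = ""
--             result.append(ch)
--     if buf:
--         result.append(buf)
--     return result
-- ===== Notes on version B (the rewrite author's own statement) =====
-- stated objective: simpler
-- what changed: Replaces itertools.groupby (group runs, re-test value.isdigit, then re-iterate non-digit groups char by char) with a direct one-pass tokenizer that keeps a current digit-run buffer and emits tokens as it scans.
import Mathlib
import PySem

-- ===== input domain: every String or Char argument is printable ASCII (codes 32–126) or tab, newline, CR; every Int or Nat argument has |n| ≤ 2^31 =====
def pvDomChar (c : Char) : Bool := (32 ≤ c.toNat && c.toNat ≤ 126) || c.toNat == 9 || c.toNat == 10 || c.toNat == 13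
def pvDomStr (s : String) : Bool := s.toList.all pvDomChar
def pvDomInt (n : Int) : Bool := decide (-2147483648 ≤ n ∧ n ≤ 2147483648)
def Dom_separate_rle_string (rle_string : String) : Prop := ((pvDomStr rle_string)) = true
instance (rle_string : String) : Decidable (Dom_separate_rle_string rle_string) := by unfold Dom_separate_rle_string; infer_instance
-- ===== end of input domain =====

-- B replaces itertools.groupby with a direct one-pass tokenizer keeping a digit-run buffer (simpler; same return value).

-- ===== PORT A =====
-- itertools.groupby(s, str.isdigit): take the maximal run with the same key as the first char
def pvGroupRun (k : Bool) : List Char → List Char × List Char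
  | [] => ([], [])
  | c :: rest =>
    if PySem.Chars.isdigit c = k then
      let (g, r) := pvGroupRun k rest
      (c :: g, r)
    else ([], c :: rest)

theorem pvGroupRun_snd_le (k : Bool) (l : List Char) : (pvGroupRun k l).2.length ≤ l.length := by
  induction l with
  | nil => simp [pvGroupRun]
  | cons c rest ih =>
    simp only [pvGroupRun]
    split
    · simpa using Nat.le_succ_of_le ih
    · simp

def pvGroupby : List Char → List (Bool × List Char)
  | [] => []
  | c :: rest =>
    let p := pvGroupRun (PySem.Chars.isdigit c) rest
    (PySem.Chars.isdigit c, c :: p.1) :: pvGroupby p.2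
termination_by l => l.length
decreasing_by exact Nat.lt_succ_of_le (pvGroupRun_snd_le _ rest)

-- the body of A's 'for key, group in …' loop
def pvStep (acc : List String) (kg : Bool × List Char) : List String :=
  if PySem.Chars.strIsdigit kg.2 then acc ++ [String.ofList kg.2]
  else acc ++ kg.2.map (fun c => String.ofList [c])

def separate_rle_string (rle_string : String) : List String :=
  (pvGroupby rle_string.toList).foldl pvStep []

-- ===== PORT B =====
-- one pass, carrying the result so far and the current digit-run buffer
def pvAltGo (res : List String) (buf : List Char) : List Char → List String
  | [] => if buf.isEmpty then res else res ++ [String.ofList buf]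
  | c :: rest =>
    if PySem.Chars.isdigit c then pvAltGo res (buf ++ [c]) rest
    else pvAltGo ((if buf.isEmpty then res else res ++ [String.ofList buf]) ++ [String.ofList [c]]) [] rest

def separate_rle_string_alt (rle_string : String) : List String :=
  pvAltGo [] [] rle_string.toList

-- ===== PRECONDITION & SPEC =====
def Spec_separate_rle_string (rle_string : String) (out : List String) : Prop := out = separate_rle_string_alt rle_string
instance (rle_string : String) (out : List String) : Decidable (Spec_separate_rle_string rle_string out) := by unfold Spec_separate_rle_string; infer_instance

-- ===== CLAIM (what is proved, stated in full; the proofs are below) =====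
def Claim_equal_separate_rle_string : Prop := ∀ (rle_string : String), Dom_separate_rle_string rle_string → Spec_separate_rle_string rle_string (separate_rle_string rle_string)

-- ===== LEMMAS AND PROOFS =====


theorem pvGroupby_nil : pvGroupby [] = [] := by rw [pvGroupby.eq_def]

theorem pvGroupby_cons (c : Char) (rest : List Char) :
    pvGroupby (c :: rest) =
      (PySem.Chars.isdigit c, c :: (pvGroupRun (PySem.Chars.isdigit c) rest).1) ::
        pvGroupby (pvGroupRun (PySem.Chars.isdigit c) rest).2 := by rw [pvGroupby.eq_def]

-- a run of the 'false' key folds char-by-char: consuming it up front equals folding over the groups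
theorem pvFold_groupRun_false (rest : List Char) (res : List String) :
    (pvGroupby rest).foldl pvStep res =
      (pvGroupby (pvGroupRun false rest).2).foldl pvStep
        (res ++ (pvGroupRun false rest).1.map (fun c => String.ofList [c])) := by
  cases rest with
  | nil => simp [pvGroupRun, pvGroupby_nil]
  | cons c rest' =>
    by_cases h : PySem.Chars.isdigit c = false
    · rw [pvGroupby_cons]
      simp only [pvGroupRun, h, if_true]
      simp [pvStep, PySem.Chars.strIsdigit, h]
    · simp only [pvGroupRun, h]
      simp

theorem pvFold_cons_nondigit (c : Char) (rest : List Char) (res : List String)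
    (h : PySem.Chars.isdigit c = false) :
    (pvGroupby (c :: rest)).foldl pvStep res =
      (pvGroupby rest).foldl pvStep (res ++ [String.ofList [c]]) := by
  rw [pvGroupby_cons]
  simp only [h]
  rw [List.foldl_cons, pvFold_groupRun_false rest (res ++ [String.ofList [c]])]
  congr 1
  simp [pvStep, PySem.Chars.strIsdigit, h]

-- a digit run followed by a non-digit (or the end) is exactly one group
theorem pvGroupRun_digits (buf t : List Char) (hb : buf.all PySem.Chars.isdigit = true)
    (ht : ∀ c ∈ t.head?, PySem.Chars.isdigit c = false) :
    pvGroupRun true (buf ++ t) = (buf, t) := by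
  induction buf with
  | nil =>
    cases t with
    | nil => simp [pvGroupRun]
    | cons c r => simp [pvGroupRun, ht c (by simp)]
  | cons b bs ih =>
    simp only [List.all_cons, Bool.and_eq_true] at hb
    simp [pvGroupRun, hb.1, ih hb.2]

-- main invariant: the tokenizer with an all-digit buffer equals A's fold over buf ++ l
theorem pvAltGo_eq_fold (l : List Char) (buf : List Char) (res : List String)
    (hb : buf.all PySem.Chars.isdigit = true) :
    pvAltGo res buf l = (pvGroupby (buf ++ l)).foldl pvStep res := by
  induction l generalizing buf res with
  | nil =>
    cases buf with
    | nil => simp [pvAltGo, pvGroupby_nil]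
    | cons b bs =>
      simp only [List.all_cons, Bool.and_eq_true] at hb
      have hg : pvGroupRun true bs = (bs, []) := by
        simpa using pvGroupRun_digits bs [] hb.2 (by simp)
      rw [List.append_nil, pvGroupby_cons]
      simp only [hb.1, hg]
      simp [pvAltGo, pvStep, PySem.Chars.strIsdigit, hb.1, hb.2, pvGroupby_nil]
  | cons c rest ih =>
    by_cases h : PySem.Chars.isdigit c = true
    · rw [pvAltGo]
      simp only [h, if_true]
      rw [ih (buf ++ [c]) res (by simp_all)]
      simp
    · replace h : PySem.Chars.isdigit c = false := by simpa using h
      rw [pvAltGo]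
      simp only [h, Bool.false_eq_true, if_false]
      rw [ih [] _ rfl, List.nil_append]
      cases buf with
      | nil =>
        simp only [List.isEmpty_nil, if_true, List.nil_append]
        exact (pvFold_cons_nondigit c rest res h).symm
      | cons b bs =>
        simp only [List.all_cons, Bool.and_eq_true] at hb
        rw [List.cons_append, pvGroupby_cons]
        simp only [hb.1, pvGroupRun_digits bs (c :: rest) hb.2 (by simp [h])]
        rw [List.foldl_cons, pvFold_cons_nondigit c rest _ h]
        simp [pvStep, PySem.Chars.strIsdigit, hb.1, hb.2]

-- ===== VERDICT (by name: the statement is the Claim_ definition above) =====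
theorem separate_rle_string_spec : Claim_equal_separate_rle_string := by
  intro s _
  unfold Spec_separate_rle_string separate_rle_string separate_rle_string_alt
  rw [pvAltGo_eq_fold s.toList [] [] rfl, List.nil_append]
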